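-- pv_equiv track=rewrite | github.com/hiatus/pwntern | pwntern.py | generate_pattern
-- ===== SOURCE A (Python) =====
-- import itertools
-- import math
--
-- def generate_pattern(charsets: list, length=-1) -> str:
--     segment_length = len(charsets)
--     max_length = math.prod([len(cs) for cs in charsets]) * segment_length
--
--     if length > max_length:
--         raise ValueError(
--             f'[!] {length} > {max_length}: '
--             f'length greater than the largest possible pattern'
--         )
--
--     if length < 0:
--         length = max_length
--
--     pattern = ''
--     combinations = itertools.product(*[list(c) for c in charsets])
--
--     for _ in range(0, length, segment_length):
--         pattern += ''.join(c for c in next(combinations))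
--
--     return pattern[:length]
-- ===== SOURCE B (Python) =====
-- import math
--
--
-- def generate_pattern(charsets: list, length=-1) -> str:
--     sizes = [len(cs) for cs in charsets]
--     if length < 0:
--         length = math.prod(sizes) * len(charsets)
--     nseg = (length + len(charsets) - 1) // len(charsets)
--     parts = []
--     for n in range(nseg):
--         chars = []
--         t = n
--         for cs, s in zip(reversed(charsets), reversed(sizes)):
--             chars.append(cs[t % s])
--             t //= s
--         parts.append(''.join(reversed(chars)))
--     return ''.join(parts)[:length]
-- ===== Notes on version B (the rewrite author's own statement) =====
-- stated objective: faster
-- what changed: Replaces the stateful itertools.product iterator (an odometer advanced by next() each segment) with a closed-form computation: each segment's characters are obtained directly from its ordinal index by peeling mixed-radix digits with % and //.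
-- outside the precondition, e.g. on generate_pattern([], -1): A raises ValueError, B raises ZeroDivisionError; on generate_pattern(['ab'], 5): A raises ValueError, B returns 'ababa'
import Mathlib
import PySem

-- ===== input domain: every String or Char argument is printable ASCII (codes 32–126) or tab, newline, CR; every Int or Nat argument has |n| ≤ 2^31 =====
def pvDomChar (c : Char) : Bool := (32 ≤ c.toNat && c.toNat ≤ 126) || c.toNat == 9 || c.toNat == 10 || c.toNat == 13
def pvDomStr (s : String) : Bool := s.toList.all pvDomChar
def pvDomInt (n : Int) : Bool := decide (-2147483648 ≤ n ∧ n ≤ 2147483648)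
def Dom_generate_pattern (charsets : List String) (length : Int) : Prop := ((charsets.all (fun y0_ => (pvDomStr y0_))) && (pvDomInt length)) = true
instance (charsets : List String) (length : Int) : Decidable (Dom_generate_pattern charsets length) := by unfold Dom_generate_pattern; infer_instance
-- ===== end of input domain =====

-- B replaces A's stateful itertools.product iterator (and its quadratic `pattern +=`
-- accumulation) by closed-form mixed-radix digits per segment, joined once (objective: faster).


-- ===== PORT A =====
-- itertools.product yields tuples in odometer order (rightmost charset fastest);
-- the iterator's state is the tuple of current indices, kept little-endian here
-- (list `odo` of digits, paired with `sizesRev` = reversed radices).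
-- one `next(combinations)` step: increment the little-endian odometer
def incRev : List Nat → List Nat → List Nat
  | _, [] => []
  | [], _ :: ds => ds
  | s :: ss, d :: ds => if d + 1 < s then (d + 1) :: ds else 0 :: incRev ss ds

-- ''.join(c for c in tuple): the tuple's digits (big-endian) index the charsets
def tupleChars (css : List (List Char)) (digits : List Nat) : List Char :=
  (css.zip digits).map (fun p => p.1.getD p.2 ' ')

-- the `for _ in range(0, length, segment_length)` loop: k iterations, state = (odometer, pattern)
def aLoop (css : List (List Char)) (sizesRev : List Nat) : Nat → List Nat → List Char → List Char
  | 0, _, acc => acc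
  | k + 1, odo, acc => aLoop css sizesRev k (incRev sizesRev odo) (acc ++ tupleChars css odo.reverse)

def generate_pattern (charsets : List String) (length : Int) : String :=
  let css := charsets.map String.toList
  let sizes := css.map List.length
  let seg := charsets.length
  let maxLen : Int := ((sizes.prod * seg : Nat) : Int)
  -- `if length > max_length: raise ValueError` — excluded by Pre_
  let L : Int := if length < 0 then maxLen else length
  -- range(0, L, seg) iterates ⌈L/seg⌉ times (L ≥ 0 here; seg = 0 raises ValueError, outside Pre_)
  let k : Nat := if seg = 0 then 0 else (L.toNat + seg - 1) / seg
  let pattern := aLoop css sizes.reverse k (List.replicate seg 0) []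
  -- pattern[:L] with 0 ≤ L is a prefix
  String.ofList (pattern.take L.toNat)

-- ===== PORT B =====
-- the inner `for cs, s in zip(reversed(charsets), reversed(sizes))` loop:
-- peel mixed-radix digits of the ordinal t by % and //, indexing the reversed charsets
def bSeg : List (List Char) → List Nat → Nat → List Char
  | cs :: csr, s :: ssr, t => cs.getD (t % s) ' ' :: bSeg csr ssr (t / s)
  | _, _, _ => []

def generate_pattern_alt (charsets : List String) (length : Int) : String :=
  let css := charsets.map String.toList
  let sizes := css.map List.length
  let seg := charsets.length
  let L : Int := if length < 0 then ((sizes.prod * seg : Nat) : Int) else length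
  -- nseg = (L + seg - 1) // seg; seg = 0 raises ZeroDivisionError (outside Pre_)
  let k : Nat := if seg = 0 then 0 else (PySem.Int.floordiv (L + seg - 1) seg).toNat
  -- ''.join(reversed(chars)) per segment
  let parts := (List.range k).map (fun n => (bSeg css.reverse sizes.reverse n).reverse)
  String.ofList (parts.flatten.take L.toNat)

-- ===== PRECONDITION & SPEC =====
-- Pre_ excludes charsets = [] (A's range(0, len, 0) raises ValueError) and
-- length > max_length (A raises ValueError explicitly); A raises on exactly these.
def Pre_generate_pattern (charsets : List String) (length : Int) : Prop :=
  charsets ≠ [] ∧ length ≤ (((charsets.map (fun s => s.toList.length)).prod * charsets.length : Nat) : Int)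

instance (charsets : List String) (length : Int) : Decidable (Pre_generate_pattern charsets length) := by
  unfold Pre_generate_pattern; infer_instance

def pvWitness_generate_pattern : List String × Int := (["ab", "c"], 3)

def Spec_generate_pattern (charsets : List String) (length : Int) (out : String) : Prop := out = generate_pattern_alt charsets length
instance (charsets : List String) (length : Int) (out : String) : Decidable (Spec_generate_pattern charsets length out) := by unfold Spec_generate_pattern; infer_instance

-- ===== CLAIM (what is proved, stated in full; the proofs are below) =====
def Claim_equal_generate_pattern : Prop := ∀ (charsets : List String) (length : Int), Dom_generate_pattern charsets length → Pre_generate_pattern charsets length → Spec_generate_pattern charsets length (generate_pattern charsets length)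

-- ===== LEMMAS AND PROOFS =====

-- abbreviations for the let-bound values shared by both ports
def cssOf (charsets : List String) : List (List Char) := charsets.map String.toList
def sizesOf (charsets : List String) : List Nat := (cssOf charsets).map List.length
def Lval (charsets : List String) (length : Int) : Int :=
  if length < 0 then (((sizesOf charsets).prod * charsets.length : Nat) : Int) else length
def kA (charsets : List String) (length : Int) : Nat :=
  if charsets.length = 0 then 0 else ((Lval charsets length).toNat + charsets.length - 1) / charsets.length
def kB (charsets : List String) (length : Int) : Nat :=
  if charsets.length = 0 then 0
  else (PySem.Int.floordiv (Lval charsets length + charsets.length - 1) charsets.length).toNat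

theorem genA_def (charsets : List String) (length : Int) :
    generate_pattern charsets length
      = String.ofList ((aLoop (cssOf charsets) (sizesOf charsets).reverse (kA charsets length)
          (List.replicate charsets.length 0) []).take (Lval charsets length).toNat) := rfl

theorem genB_def (charsets : List String) (length : Int) :
    generate_pattern_alt charsets length
      = String.ofList ((((List.range (kB charsets length)).map
          (fun n => (bSeg (cssOf charsets).reverse (sizesOf charsets).reverse n).reverse)).flatten).take
          (Lval charsets length).toNat) := rfl

-- little-endian mixed-radix digits of n for (reversed) radix list
def digitsRev : List Nat → Nat → List Nat
  | [], _ => []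
  | s :: ss, n => (n % s) :: digitsRev ss (n / s)

-- big-endian mixed-radix digits of n (what B computes per position)
def bigDigits : List Nat → Nat → List Nat
  | [], _ => []
  | s :: ss, n => ((n / ss.prod) % s) :: bigDigits ss n

-- the common specification: k segments starting at ordinal n, concatenated
def specSegs (css : List (List Char)) (sizes : List Nat) : Nat → Nat → List Char
  | 0, _ => []
  | k + 1, n => tupleChars css (bigDigits sizes n) ++ specSegs css sizes k (n + 1)

theorem digitsRev_zero (sr : List Nat) : digitsRev sr 0 = List.replicate sr.length 0 := by
  induction sr with
  | nil => rfl
  | cons s ss ih => simp [digitsRev, Nat.zero_mod, Nat.zero_div, ih, List.replicate_succ]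

theorem incRev_digitsRev (sr : List Nat) (hpos : ∀ s ∈ sr, 0 < s) (n : Nat) :
    incRev sr (digitsRev sr n) = digitsRev sr (n + 1) := by
  induction sr generalizing n with
  | nil => rfl
  | cons s ss ih =>
    have hs : 0 < s := hpos s (by simp)
    have hss : ∀ t ∈ ss, 0 < t := fun t ht => hpos t (by simp [ht])
    simp only [digitsRev, incRev]
    by_cases h : n % s + 1 < s
    · have h1 : (n + 1) % s = n % s + 1 := by
        have : n + 1 = (n % s + 1) + s * (n / s) := by
          have := Nat.div_add_mod n s; omega
        rw [this, Nat.add_mul_mod_self_left, Nat.mod_eq_of_lt h]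
      have h2 : (n + 1) / s = n / s := by
        have : n + 1 = (n % s + 1) + s * (n / s) := by
          have := Nat.div_add_mod n s; omega
        rw [this, Nat.add_mul_div_left _ _ hs, Nat.div_eq_of_lt h, Nat.zero_add]
      simp [h, h1, h2]
    · have hlt : n % s < s := Nat.mod_lt _ hs
      have hdistrib : s * (n / s + 1) = s * (n / s) + s := by ring
      have hn1 : n + 1 = s * (n / s + 1) := by
        have := Nat.div_add_mod n s; omega
      have h1 : (n + 1) % s = 0 := by rw [hn1]; exact Nat.mul_mod_right _ _
      have h2 : (n + 1) / s = n / s + 1 := by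
        rw [hn1]; exact Nat.mul_div_cancel_left _ hs
      simp only [h, if_false, h1, h2]
      rw [ih hss]

theorem bigDigits_append_single (ts : List Nat) (s n : Nat) :
    bigDigits (ts ++ [s]) n = bigDigits ts (n / s) ++ [n % s] := by
  induction ts generalizing n with
  | nil => simp [bigDigits]
  | cons t ts ih =>
    simp only [List.cons_append, bigDigits, List.prod_append, List.prod_cons, List.prod_nil,
      Nat.mul_one, ih]
    have h2 : n / (ts.prod * s) = n / s / ts.prod := by
      rw [Nat.div_div_eq_div_mul, Nat.mul_comm]
    rw [h2]

theorem digitsRev_eq_reverse_bigDigits (sr : List Nat) (n : Nat) :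
    digitsRev sr n = (bigDigits sr.reverse n).reverse := by
  induction sr generalizing n with
  | nil => rfl
  | cons s ss ih =>
    simp only [digitsRev, List.reverse_cons, bigDigits_append_single, List.reverse_append,
      List.reverse_cons, List.reverse_nil, List.nil_append, List.cons_append, ih]

theorem bSeg_eq_tupleChars (cssR : List (List Char)) (srR : List Nat) (t : Nat) :
    bSeg cssR srR t = tupleChars cssR (digitsRev srR t) := by
  induction cssR generalizing srR t with
  | nil => cases srR <;> rfl
  | cons c cssR ih =>
    cases srR with
    | nil => rfl
    | cons s ssR => simp [bSeg, digitsRev, tupleChars] at ih ⊢; exact ih ssR _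

theorem bigDigits_length (sizes : List Nat) (n : Nat) : (bigDigits sizes n).length = sizes.length := by
  induction sizes generalizing n with
  | nil => rfl
  | cons s ss ih => simp [bigDigits, ih]

theorem tupleChars_append_single (xs : List (List Char)) (ys : List Nat) (c : List Char) (d : Nat)
    (h : xs.length = ys.length) :
    tupleChars (xs ++ [c]) (ys ++ [d]) = tupleChars xs ys ++ [c.getD d ' '] := by
  unfold tupleChars
  rw [List.zip_append h, List.map_append]
  rfl

theorem tupleChars_reverse (xs : List (List Char)) (ys : List Nat) (h : xs.length = ys.length) :
    (tupleChars xs ys).reverse = tupleChars xs.reverse ys.reverse := by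
  induction xs generalizing ys with
  | nil => cases ys with | nil => rfl | cons y ys => simp at h
  | cons x xs ih =>
    cases ys with
    | nil => simp at h
    | cons y ys =>
      have h' : xs.length = ys.length := by simpa using h
      have hr : xs.reverse.length = ys.reverse.length := by simpa using h'
      rw [List.reverse_cons, List.reverse_cons,
        tupleChars_append_single xs.reverse ys.reverse x y hr, ← ih ys h']
      simp [tupleChars]

theorem aLoop_eq_specSegs (css : List (List Char)) (sr : List Nat)
    (hpos : ∀ s ∈ sr, 0 < s) (k : Nat) :
    ∀ (n : Nat) (acc : List Char),
      aLoop css sr k (digitsRev sr n) acc = acc ++ specSegs css sr.reverse k n := by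
  induction k with
  | zero => intro n acc; simp [aLoop, specSegs]
  | succ k ih =>
    intro n acc
    rw [aLoop, incRev_digitsRev sr hpos n, ih (n + 1)]
    have hrev : (digitsRev sr n).reverse = bigDigits sr.reverse n := by
      rw [digitsRev_eq_reverse_bigDigits, List.reverse_reverse]
    rw [hrev, specSegs, List.append_assoc]

theorem flatten_range_spec (css : List (List Char)) (sizes : List Nat) (k : Nat) :
    ∀ n : Nat, ((List.range k).map (fun i => tupleChars css (bigDigits sizes (n + i)))).flatten
      = specSegs css sizes k n := by
  induction k with
  | zero => intro n; simp [specSegs]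
  | succ k ih =>
    intro n
    rw [List.range_succ_eq_map, List.map_cons, List.map_map, List.flatten_cons, specSegs,
      Nat.add_zero]
    congr 1
    rw [← ih (n + 1)]
    congr 1
    apply List.map_congr_left
    intro i _
    simp only [Function.comp_apply, Nat.succ_eq_add_one]
    have h : n + (i + 1) = n + 1 + i := by omega
    rw [h]

-- the two ports compute the same iteration count
theorem count_eq (charsets : List String) (length : Int) (hL : 0 ≤ Lval charsets length)
    (hseg : 0 < charsets.length) : kB charsets length = kA charsets length := by
  unfold kA kB
  rw [if_neg (Nat.pos_iff_ne_zero.mp hseg), if_neg (Nat.pos_iff_ne_zero.mp hseg)]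
  obtain ⟨m, hm⟩ := Int.eq_ofNat_of_zero_le hL
  rw [hm]
  have hcast : ((m : Int) + charsets.length - 1) = ((m + charsets.length - 1 : Nat) : Int) := by
    omega
  rw [hcast, PySem.Int.floordiv_natCast, Int.toNat_natCast, Int.toNat_natCast]

-- ===== VERDICT (by name: the statement is the Claim_ definition above) =====
theorem generate_pattern_spec : Claim_equal_generate_pattern := by
  intro charsets length _hdom hpre
  obtain ⟨hne, hle⟩ := hpre
  unfold Spec_generate_pattern
  rw [genA_def, genB_def]
  have hsegpos : 0 < charsets.length := List.length_pos_iff.mpr hne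
  have hL0 : 0 ≤ Lval charsets length := by
    unfold Lval; split_ifs with h
    · positivity
    · omega
  rw [count_eq charsets length hL0 hsegpos]
  by_cases hLz : (Lval charsets length).toNat = 0
  · rw [hLz]; simp
  · -- positive requested length: Pre_ forces every charset nonempty
    have hLmax : Lval charsets length ≤ (((sizesOf charsets).prod * charsets.length : Nat) : Int) := by
      unfold Lval; split_ifs with h
      · exact le_refl _
      · simpa [sizesOf, cssOf] using hle
    have hprodpos : 0 < (sizesOf charsets).prod := by
      by_contra h
      have hz : (sizesOf charsets).prod = 0 := by omega
      rw [hz] at hLmax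
      simp at hLmax
      omega
    have hpos : ∀ s ∈ sizesOf charsets, 0 < s := by
      intro s hs
      by_contra h
      have hs0 : s = 0 := by omega
      have : (sizesOf charsets).prod = 0 := List.prod_eq_zero (hs0 ▸ hs)
      omega
    have hposr : ∀ s ∈ (sizesOf charsets).reverse, 0 < s := fun s hs => hpos s (List.mem_reverse.mp hs)
    have hlen : (sizesOf charsets).reverse.length = charsets.length := by simp [sizesOf, cssOf]
    have hA : aLoop (cssOf charsets) (sizesOf charsets).reverse (kA charsets length)
        (List.replicate charsets.length 0) []
        = specSegs (cssOf charsets) (sizesOf charsets) (kA charsets length) 0 := by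
      rw [← hlen, ← digitsRev_zero,
        aLoop_eq_specSegs (cssOf charsets) (sizesOf charsets).reverse hposr (kA charsets length) 0 [],
        List.nil_append, List.reverse_reverse]
    have hlen2 : (cssOf charsets).length = (sizesOf charsets).length := by simp [sizesOf]
    have hB : ((List.range (kA charsets length)).map
        (fun n => (bSeg (cssOf charsets).reverse (sizesOf charsets).reverse n).reverse)).flatten
        = specSegs (cssOf charsets) (sizesOf charsets) (kA charsets length) 0 := by
      rw [← flatten_range_spec (cssOf charsets) (sizesOf charsets) (kA charsets length) 0]
      congr 1
      apply List.map_congr_left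
      intro i _
      simp only [Nat.zero_add]
      rw [bSeg_eq_tupleChars, digitsRev_eq_reverse_bigDigits, List.reverse_reverse,
        ← tupleChars_reverse (cssOf charsets) (bigDigits (sizesOf charsets) i)
          (by rw [bigDigits_length]; exact hlen2),
        List.reverse_reverse]
    rw [hA, hB]
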